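-- pv_equiv track=rewrite | github.com/kll/boostburn | src/boostburn/pricing_scraper.py | _split_model_and_regions
-- ===== SOURCE A (Python) =====
-- from typing import Dict, Iterable, Optional
-- import unicodedata
--
-- _REGION_NAME_TO_CODE = {
--     "us east (n. virginia)": "us-east-1",
--     "us east (ohio)": "us-east-2",
--     "us west (oregon)": "us-west-2",
--     "us west (n. california)": "us-west-1",
--     "canada (central)": "ca-central-1",
--     "eu (ireland)": "eu-west-1",
--     "eu (london)": "eu-west-2",
--     "eu (paris)": "eu-west-3",
--     "eu (frankfurt)": "eu-central-1",
--     "eu (zurich)": "eu-central-2",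
--     "eu (stockholm)": "eu-north-1",
--     "eu (milan)": "eu-south-1",
--     "europe (spain)": "eu-south-2",
--     "asia pacific (tokyo)": "ap-northeast-1",
--     "asia pacific (seoul)": "ap-northeast-2",
--     "asia pacific (osaka)": "ap-northeast-3",
--     "asia pacific (mumbai)": "ap-south-1",
--     "asia pacific (hyderabad)": "ap-south-2",
--     "asia pacific (singapore)": "ap-southeast-1",
--     "asia pacific (sydney)": "ap-southeast-2",
--     "asia pacific (jakarta)": "ap-southeast-3",
--     "asia pacific (melbourne)": "ap-southeast-4",
--     "asia pacific (malaysia)": "ap-southeast-5",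
--     "asia pacific (thailand)": "ap-southeast-7",
--     "south america (sao paulo)": "sa-east-1",
--     "middle east (uae)": "me-central-1",
--     "middle east (bahrain)": "me-south-1",
--     "israel (tel aviv)": "il-central-1",
--     "africa (cape town)": "af-south-1",
-- }
--
-- def _normalize_region_name(value: str) -> str:
--     lowered = value.lower()
--     normalized = unicodedata.normalize("NFKD", lowered)
--     return "".join(char for char in normalized if not unicodedata.combining(char))
--
-- def _split_model_and_regions(text: str) -> tuple[str, list[str]]:
--     if not text:
--         return "", []
--     normalized = _normalize_region_name(text)
--     first_idx: Optional[int] = None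
--     for region_name in _REGION_NAME_TO_CODE:
--         idx = normalized.find(region_name)
--         if idx == -1:
--             continue
--         if first_idx is None or idx < first_idx:
--             first_idx = idx
--     if first_idx is None:
--         return text.strip(), []
--     model_text = text[:first_idx].strip(" ,;|-")
--     region_text = text[first_idx:]
--     region_codes = _extract_region_codes(region_text)
--     return model_text, region_codes
--
-- def _extract_region_codes(text: str) -> list[str]:
--     normalized = _normalize_region_name(text)
--     matches: list[tuple[int, str]] = []
--     for region_name, region_code in _REGION_NAME_TO_CODE.items():
--         idx = normalized.find(region_name)
--         if idx == -1:
--             continue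
--         matches.append((idx, region_code))
--     matches.sort(key=lambda item: item[0])
--     region_codes: list[str] = []
--     for _, code in matches:
--         if code not in region_codes:
--             region_codes.append(code)
--     return region_codes
-- ===== SOURCE B (Python) =====
-- from typing import Optional
-- import unicodedata
--
-- _REGION_NAME_TO_CODE = {
--     "us east (n. virginia)": "us-east-1",
--     "us east (ohio)": "us-east-2",
--     "us west (oregon)": "us-west-2",
--     "us west (n. california)": "us-west-1",
--     "canada (central)": "ca-central-1",
--     "eu (ireland)": "eu-west-1",
--     "eu (london)": "eu-west-2",
--     "eu (paris)": "eu-west-3",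
--     "eu (frankfurt)": "eu-central-1",
--     "eu (zurich)": "eu-central-2",
--     "eu (stockholm)": "eu-north-1",
--     "eu (milan)": "eu-south-1",
--     "europe (spain)": "eu-south-2",
--     "asia pacific (tokyo)": "ap-northeast-1",
--     "asia pacific (seoul)": "ap-northeast-2",
--     "asia pacific (osaka)": "ap-northeast-3",
--     "asia pacific (mumbai)": "ap-south-1",
--     "asia pacific (hyderabad)": "ap-south-2",
--     "asia pacific (singapore)": "ap-southeast-1",
--     "asia pacific (sydney)": "ap-southeast-2",
--     "asia pacific (jakarta)": "ap-southeast-3",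
--     "asia pacific (melbourne)": "ap-southeast-4",
--     "asia pacific (malaysia)": "ap-southeast-5",
--     "asia pacific (thailand)": "ap-southeast-7",
--     "south america (sao paulo)": "sa-east-1",
--     "middle east (uae)": "me-central-1",
--     "middle east (bahrain)": "me-south-1",
--     "israel (tel aviv)": "il-central-1",
--     "africa (cape town)": "af-south-1",
-- }
--
-- def _normalize_region_name(value: str) -> str:
--     lowered = value.lower()
--     normalized = unicodedata.normalize("NFKD", lowered)
--     return "".join(char for char in normalized if not unicodedata.combining(char))
--
-- def _split_model_and_regions(text: str) -> tuple[str, list[str]]: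
--     if not text:
--         return "", []
--     normalized = _normalize_region_name(text)
--     # single left-to-right scan: first position where any region name starts
--     first_idx: Optional[int] = next(
--         (i for i in range(len(normalized))
--          if any(normalized[i:i + len(name)] == name for name in _REGION_NAME_TO_CODE)),
--         None,
--     )
--     if first_idx is None:
--         return text.strip(), []
--     model_text = text[:first_idx].strip(" ,;|-")
--     norm_tail = _normalize_region_name(text[first_idx:])
--     # single left-to-right scan of the tail: codes in position order, first occurrence wins
--     region_codes: list[str] = []
--     for i in range(len(norm_tail)):
--         for name, code in _REGION_NAME_TO_CODE.items():
--             if norm_tail[i:i + len(name)] == name and code not in region_codes: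
--                 region_codes.append(code)
--     return model_text, region_codes
-- ===== Notes on version B (the rewrite author's own statement) =====
-- stated objective: alternative
-- what changed: A runs str.find once per region name, takes the min index, then re-finds every name in the tail, sorts the (index, code) pairs and dedupes; B instead makes a single left-to-right scan over positions, testing which region name starts at each position, so the first match position and the codes in first-occurrence order fall out of one pass with no per-name find, no min loop and no sort.
import Mathlib
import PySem

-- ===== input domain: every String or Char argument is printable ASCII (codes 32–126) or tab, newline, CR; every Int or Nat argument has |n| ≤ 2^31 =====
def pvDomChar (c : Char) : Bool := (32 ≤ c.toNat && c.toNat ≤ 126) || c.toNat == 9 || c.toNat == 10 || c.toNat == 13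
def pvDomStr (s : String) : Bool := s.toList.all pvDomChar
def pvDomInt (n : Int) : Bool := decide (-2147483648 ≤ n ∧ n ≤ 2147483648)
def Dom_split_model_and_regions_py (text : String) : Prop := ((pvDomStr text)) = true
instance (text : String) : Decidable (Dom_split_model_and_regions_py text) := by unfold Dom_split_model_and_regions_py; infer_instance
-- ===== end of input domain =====

-- B replaces A's find-per-region-name + min + sort-by-index pipeline by a single
-- left-to-right position scan (alternative decomposition; not claimed faster).

-- ===== PORT A =====
-- _REGION_NAME_TO_CODE, in insertion order
def pvRegionTable : List (String × String) := [
  ("us east (n. virginia)", "us-east-1"),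
  ("us east (ohio)", "us-east-2"),
  ("us west (oregon)", "us-west-2"),
  ("us west (n. california)", "us-west-1"),
  ("canada (central)", "ca-central-1"),
  ("eu (ireland)", "eu-west-1"),
  ("eu (london)", "eu-west-2"),
  ("eu (paris)", "eu-west-3"),
  ("eu (frankfurt)", "eu-central-1"),
  ("eu (zurich)", "eu-central-2"),
  ("eu (stockholm)", "eu-north-1"),
  ("eu (milan)", "eu-south-1"),
  ("europe (spain)", "eu-south-2"),
  ("asia pacific (tokyo)", "ap-northeast-1"),
  ("asia pacific (seoul)", "ap-northeast-2"),
  ("asia pacific (osaka)", "ap-northeast-3"),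
  ("asia pacific (mumbai)", "ap-south-1"),
  ("asia pacific (hyderabad)", "ap-south-2"),
  ("asia pacific (singapore)", "ap-southeast-1"),
  ("asia pacific (sydney)", "ap-southeast-2"),
  ("asia pacific (jakarta)", "ap-southeast-3"),
  ("asia pacific (melbourne)", "ap-southeast-4"),
  ("asia pacific (malaysia)", "ap-southeast-5"),
  ("asia pacific (thailand)", "ap-southeast-7"),
  ("south america (sao paulo)", "sa-east-1"),
  ("middle east (uae)", "me-central-1"),
  ("middle east (bahrain)", "me-south-1"),
  ("israel (tel aviv)", "il-central-1"),
  ("africa (cape town)", "af-south-1")]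

-- _normalize_region_name: value.lower(); the NFKD step and the combining-character
-- filter are the identity on the printable-ASCII input domain (exact there).
def pvNormalize (s : String) : String := PySem.Str.lower s

-- _extract_region_codes
def pvExtractRegionCodes (t : String) : List String :=
  let normalized := pvNormalize t
  let matchList : List (Int × String) := pvRegionTable.foldl (fun acc p =>
      let idx := PySem.Str.find normalized p.1
      if idx = -1 then acc else acc ++ [(idx, p.2)]) []
  let sortedMatches := PySem.List.sorted matchList (fun item => item.1)
  sortedMatches.foldl (fun acc p => if acc.contains p.2 then acc else acc ++ [p.2]) []

def split_model_and_regions_py (text : String) : String × List String :=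
  if text = "" then ("", [])
  else
    let normalized := pvNormalize text
    let first_idx : Option Int := pvRegionTable.foldl (fun acc p =>
        let idx := PySem.Str.find normalized p.1
        if idx = -1 then acc
        else match acc with
          | none => some idx
          | some f => if idx < f then some idx else some f) none
    match first_idx with
    | none => (PySem.Str.strip text, [])
    | some i =>
      let model_text := PySem.Str.stripChars (PySem.Str.slice text none (some i)) " ,;|-"
      let region_text := PySem.Str.slice text (some i) none
      (model_text, pvExtractRegionCodes region_text)

-- ===== PORT B =====
-- normalized[i:i+len(name)] == name
def pvMatchesAt (s : String) (i : Int) (name : String) : Bool :=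
  PySem.Str.slice s (some i) (some (i + PySem.Str.len name)) == name

def split_model_and_regions_py_alt (text : String) : String × List String :=
  if text = "" then ("", [])
  else
    let normalized := pvNormalize text
    let first_idx : Option Int :=
      (PySem.List.pyRange 0 (PySem.Str.len normalized)).find?
        (fun i => pvRegionTable.any (fun p => pvMatchesAt normalized i p.1))
    match first_idx with
    | none => (PySem.Str.strip text, [])
    | some i =>
      let model_text := PySem.Str.stripChars (PySem.Str.slice text none (some i)) " ,;|-"
      let norm_tail := pvNormalize (PySem.Str.slice text (some i) none)
      let region_codes := (PySem.List.pyRange 0 (PySem.Str.len norm_tail)).foldl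
        (fun acc i => pvRegionTable.foldl
          (fun acc2 p =>
            if pvMatchesAt norm_tail i p.1 && !acc2.contains p.2 then acc2 ++ [p.2] else acc2)
          acc) []
      (model_text, region_codes)

-- ===== PRECONDITION & SPEC =====
def Spec_split_model_and_regions_py (text : String) (out : String × List String) : Prop := out = split_model_and_regions_py_alt text
instance (text : String) (out : String × List String) : Decidable (Spec_split_model_and_regions_py text out) := by unfold Spec_split_model_and_regions_py; infer_instance

-- ===== CLAIM (what is proved, stated in full; the proofs are below) =====
def Claim_equal_split_model_and_regions_py : Prop := ∀ (text : String), Dom_split_model_and_regions_py text → Spec_split_model_and_regions_py text (split_model_and_regions_py text)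

-- ===== LEMMAS AND PROOFS =====

-- A's fold step for first_idx, named (definitionally equal to the lambda in the port)
def pvStepA (u : String) (acc : Option Int) (p : String × String) : Option Int :=
  let idx := PySem.Str.find u p.1
  if idx = -1 then acc
  else match acc with
    | none => some idx
    | some f => if idx < f then some idx else some f

-- A's `matchList` accumulator, as a named function of the (already normalized) string
def pvFnd (u : String) : List (Int × String) :=
  pvRegionTable.foldl (fun acc p =>
      let idx := PySem.Str.find u p.1
      if idx = -1 then acc else acc ++ [(idx, p.2)]) []

-- the entries of pvFnd whose index is exactly j, and all entries with index < k
def pvBlock (u : String) (j : Nat) : List (Int × String) :=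
  (pvFnd u).filter (fun e => e.1 = (j : Int))
def pvInc (u : String) (k : Nat) : List (Int × String) :=
  (List.range k).flatMap (pvBlock u)

-- B's inner (per-position) loop, named (definitionally equal to the lambda in the port)
def pvInner (u : String) (acc : List String) (i : Int) : List String :=
  pvRegionTable.foldl
    (fun acc2 p =>
      if pvMatchesAt u i p.1 && !acc2.contains p.2 then acc2 ++ [p.2] else acc2) acc

-- ---- table facts ----
set_option maxHeartbeats 1000000 in
theorem tbl_pf : pvRegionTable.Pairwise
    (fun p q => ¬ (p.1.toList <+: q.1.toList) ∧ ¬ (q.1.toList <+: p.1.toList)) := by decide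
theorem tbl_ne_nil : ∀ p ∈ pvRegionTable, p.1.toList ≠ [] := by decide
theorem tbl_codes_nodup : (pvRegionTable.map Prod.snd).Nodup := by decide
theorem tbl_nodup : pvRegionTable.Nodup := by decide

-- at most one region name matches at a given suffix
theorem match_unique {p q : String × String} {u : List Char}
    (hp : p ∈ pvRegionTable) (hq : q ∈ pvRegionTable)
    (h1 : p.1.toList <+: u) (h2 : q.1.toList <+: u) : p = q := by
  by_contra hne
  have hR := List.Pairwise.forall (R := fun p q : String × String =>
      ¬ (p.1.toList <+: q.1.toList) ∧ ¬ (q.1.toList <+: p.1.toList))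
    (fun a b hab => ⟨hab.2, hab.1⟩) tbl_pf hp hq hne
  rcases List.prefix_or_prefix_of_prefix h1 h2 with h | h
  · exact hR.1 h
  · exact hR.2 h

theorem code_inj {p q : String × String}
    (hp : p ∈ pvRegionTable) (hq : q ∈ pvRegionTable) (h : p.2 = q.2) : p = q :=
  List.inj_on_of_nodup_map tbl_codes_nodup hp hq h

theorem matchesAt_iff (u name : String) (j : Nat) :
    pvMatchesAt u (j : Int) name = true ↔ name.toList <+: u.toList.drop j := by
  rw [pvMatchesAt, beq_iff_eq, PySem.Str.len_eq]
  have hc : ((j : Int) + (name.toList.length : Int)) = ((j + name.toList.length : Nat) : Int) := by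
    push_cast; ring
  rw [hc]
  constructor
  · intro h
    have h' := congrArg String.toList h
    simp only [PySem.Str.toList_slice, PySem.Chars.slice_eq_listSlice] at h'
    rw [PySem.List.slice_natCast, Nat.add_sub_cancel_left] at h'
    rw [List.prefix_iff_eq_take]
    exact h'.symm
  · intro h
    apply String.ext
    simp only [PySem.Str.toList_slice, PySem.Chars.slice_eq_listSlice]
    rw [PySem.List.slice_natCast, Nat.add_sub_cancel_left]
    exact (List.prefix_iff_eq_take.mp h).symm

-- ---- A's min-fold ----
theorem pvStepA_neg {u : String} {p : String × String} (acc : Option Int)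
    (hf : PySem.Str.find u p.1 = -1) : pvStepA u acc p = acc := by
  show (if PySem.Str.find u p.1 = -1 then acc
    else match acc with
      | none => some (PySem.Str.find u p.1)
      | some f => if PySem.Str.find u p.1 < f then some (PySem.Str.find u p.1) else some f) = acc
  rw [if_pos hf]

theorem pvStepA_none {u : String} {p : String × String}
    (hf : PySem.Str.find u p.1 ≠ -1) : pvStepA u none p = some (PySem.Str.find u p.1) := by
  show (if PySem.Str.find u p.1 = -1 then none
    else match (none : Option Int) with
      | none => some (PySem.Str.find u p.1)
      | some f => if PySem.Str.find u p.1 < f then some (PySem.Str.find u p.1) else some f) = _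
  rw [if_neg hf]

theorem pvStepA_some {u : String} {p : String × String} (f : Int)
    (hf : PySem.Str.find u p.1 ≠ -1) : pvStepA u (some f) p =
      if PySem.Str.find u p.1 < f then some (PySem.Str.find u p.1) else some f := by
  show (if PySem.Str.find u p.1 = -1 then some f
    else match (some f : Option Int) with
      | none => some (PySem.Str.find u p.1)
      | some f => if PySem.Str.find u p.1 < f then some (PySem.Str.find u p.1) else some f) = _
  rw [if_neg hf]

theorem minfold_none (u : String) (l : List (String × String)) (acc : Option Int) :
    l.foldl (pvStepA u) acc = none ↔
      acc = none ∧ ∀ p ∈ l, PySem.Str.find u p.1 = -1 := by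
  induction l generalizing acc with
  | nil => simp
  | cons p l ih =>
    rw [List.foldl_cons, ih]
    by_cases hf : PySem.Str.find u p.1 = -1
    · rw [pvStepA_neg acc hf]
      constructor
      · rintro ⟨h1, h2⟩
        exact ⟨h1, by
          intro q hq
          rcases List.mem_cons.mp hq with h | h
          · rw [h]; exact hf
          · exact h2 q h⟩
      · rintro ⟨h1, h2⟩
        exact ⟨h1, fun q hq => h2 q (List.mem_cons_of_mem _ hq)⟩
    · constructor
      · rintro ⟨h1, _⟩
        exfalso
        cases acc with
        | none => rw [pvStepA_none hf] at h1; cases h1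
        | some f =>
          rw [pvStepA_some f hf] at h1
          by_cases hlt : PySem.Str.find u p.1 < f
          · rw [if_pos hlt] at h1; cases h1
          · rw [if_neg hlt] at h1; cases h1
      · rintro ⟨_, h2⟩
        exact absurd (h2 p (List.mem_cons_self)) hf

theorem minfold_some (u : String) (l : List (String × String)) (acc : Option Int) (m : Int) :
    l.foldl (pvStepA u) acc = some m →
      (acc = some m ∨ ∃ p ∈ l, PySem.Str.find u p.1 = m ∧ m ≠ -1) ∧
      (∀ y, acc = some y → m ≤ y) ∧
      (∀ p ∈ l, PySem.Str.find u p.1 ≠ -1 → m ≤ PySem.Str.find u p.1) := by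
  induction l generalizing acc with
  | nil =>
    intro h
    simp only [List.foldl_nil] at h
    exact ⟨Or.inl h, fun y hy => by rw [hy] at h; injection h with h; omega, by simp⟩
  | cons p l ih =>
    intro h
    rw [List.foldl_cons] at h
    obtain ⟨hsrc, hacc, hmin⟩ := ih (pvStepA u acc p) h
    by_cases hf : PySem.Str.find u p.1 = -1
    · rw [pvStepA_neg acc hf] at hsrc hacc
      refine ⟨?_, hacc, ?_⟩
      · rcases hsrc with h1 | ⟨q, hq, hh⟩
        · exact Or.inl h1
        · exact Or.inr ⟨q, List.mem_cons_of_mem _ hq, hh⟩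
      · intro q hq hqf
        rcases List.mem_cons.mp hq with h1 | h1
        · exact absurd (h1 ▸ hf) (h1 ▸ hqf)
        · exact hmin q h1 hqf
    · have hstep : ∀ x, pvStepA u acc p = some x →
          (acc = some x ∨ PySem.Str.find u p.1 = x) ∧ x ≤ PySem.Str.find u p.1 ∧
          (∀ y, acc = some y → x ≤ y) := by
        intro x hx
        cases acc with
        | none =>
          rw [pvStepA_none hf] at hx
          injection hx with hx
          exact ⟨Or.inr hx, le_of_eq hx.symm, by simp⟩
        | some f =>
          rw [pvStepA_some f hf] at hx
          by_cases hlt : PySem.Str.find u p.1 < f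
          · rw [if_pos hlt] at hx
            injection hx with hx
            exact ⟨Or.inr hx, le_of_eq hx.symm, fun y hy => by
              injection hy with hy; omega⟩
          · rw [if_neg hlt] at hx
            injection hx with hx
            exact ⟨Or.inl (by rw [hx]), by omega, fun y hy => by
              injection hy with hy; omega⟩
      cases hacc2 : pvStepA u acc p with
      | none =>
        rw [hacc2] at hsrc hacc
        rcases hsrc with h1 | ⟨q, hq, hh⟩
        · cases h1
        · refine ⟨Or.inr ⟨q, List.mem_cons_of_mem _ hq, hh⟩, ?_, ?_⟩
          · intro y hy
            exfalso
            cases acc with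
            | none => rw [pvStepA_none hf] at hacc2; cases hacc2
            | some f =>
              rw [pvStepA_some f hf] at hacc2
              by_cases hlt : PySem.Str.find u p.1 < f
              · rw [if_pos hlt] at hacc2; cases hacc2
              · rw [if_neg hlt] at hacc2; cases hacc2
          · intro q' hq' hq'f
            rcases List.mem_cons.mp hq' with h1 | h1
            · exfalso
              cases acc with
              | none => rw [pvStepA_none hf] at hacc2; cases hacc2
              | some f =>
                rw [pvStepA_some f hf] at hacc2
                by_cases hlt : PySem.Str.find u p.1 < f
                · rw [if_pos hlt] at hacc2; cases hacc2
                · rw [if_neg hlt] at hacc2; cases hacc2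
            · exact hmin q' h1 hq'f
      | some x =>
        rw [hacc2] at hsrc hacc
        obtain ⟨hx1, hx2, hx3⟩ := hstep x hacc2
        have hxm : m ≤ x := hacc x rfl
        refine ⟨?_, ?_, ?_⟩
        · rcases hsrc with h1 | ⟨q, hq, hh⟩
          · injection h1 with h1
            subst h1
            rcases hx1 with h2 | h2
            · exact Or.inl h2
            · exact Or.inr ⟨p, List.mem_cons_self, h2, fun hx => hf (h2.trans hx)⟩
          · exact Or.inr ⟨q, List.mem_cons_of_mem _ hq, hh⟩
        · intro y hy
          exact le_trans hxm (hx3 y hy)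
        · intro q hq hqf
          rcases List.mem_cons.mp hq with h1 | h1
          · subst h1
            omega
          · exact hmin q h1 hqf

-- ---- B's find? over a range ----
theorem find?_pyRange_some (pred : Int → Bool) : ∀ (n : Nat) (a b i : Int), (b - a).toNat = n →
    ((PySem.List.pyRange a b).find? pred = some i ↔
      (a ≤ i ∧ i < b ∧ pred i = true ∧ ∀ j, a ≤ j → j < i → pred j = false)) := by
  intro n
  induction n with
  | zero =>
    intro a b i hn
    have hba : b ≤ a := by omega
    rw [PySem.List.pyRange_one_eq_nil hba]
    simp only [List.find?_nil]
    constructor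
    · intro h; cases h
    · rintro ⟨h1, h2, _⟩; omega
  | succ n ih =>
    intro a b i hn
    have hab : a < b := by omega
    rw [PySem.List.pyRange_one_cons hab]
    by_cases hp : pred a = true
    · rw [List.find?_cons_of_pos hp]
      constructor
      · intro h
        injection h with h
        subst h
        exact ⟨le_refl _, hab, hp, fun j h1 h2 => absurd h2 (by omega)⟩
      · rintro ⟨h1, h2, h3, h4⟩
        rcases eq_or_lt_of_le h1 with he | hlt
        · rw [he]
        · rw [h4 a (le_refl _) hlt] at hp; cases hp
    · rw [List.find?_cons_of_neg hp]
      rw [ih (a+1) b i (by omega)]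
      have hpf : pred a = false := by
        cases hpa : pred a
        · rfl
        · exact absurd hpa hp
      constructor
      · rintro ⟨h1, h2, h3, h4⟩
        refine ⟨by omega, h2, h3, fun j hj1 hj2 => ?_⟩
        by_cases hja : j = a
        · rw [hja]; exact hpf
        · exact h4 j (by omega) hj2
      · rintro ⟨h1, h2, h3, h4⟩
        have hia : a ≠ i := by
          intro he
          rw [← he] at h3
          exact hp h3
        exact ⟨by omega, h2, h3, fun j hj1 hj2 => h4 j (by omega) hj2⟩

-- a row's find, unfolded to the char level
theorem str_find_eq (u name : String) :
    PySem.Str.find u name = PySem.Chars.find u.toList name.toList := PySem.Str.find_eq u name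

-- ---- first_idx agreement ----
theorem firstidx_eq (u : String) :
    pvRegionTable.foldl (pvStepA u) none =
      (PySem.List.pyRange 0 (PySem.Str.len u)).find?
        (fun i => pvRegionTable.any (fun p => pvMatchesAt u i p.1)) := by
  cases hA : pvRegionTable.foldl (pvStepA u) none with
  | none =>
    symm
    rw [List.find?_eq_none]
    intro i hi hpred
    rw [PySem.List.mem_pyRange_one] at hi
    rw [List.any_eq_true] at hpred
    obtain ⟨p, hp, hm⟩ := hpred
    have hi0 : i = ((i.toNat : Nat) : Int) := by omega
    rw [hi0, matchesAt_iff] at hm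
    have hinf : p.1.toList <:+: u.toList := by
      exact List.infix_iff_prefix_suffix.mpr ⟨_, hm, List.drop_suffix _ _⟩
    have hfind : PySem.Str.find u p.1 ≠ -1 := by
      rw [str_find_eq]
      rw [PySem.Chars.find_ne_neg_one_iff]
      exact hinf
    exact hfind (((minfold_none u pvRegionTable none).mp hA).2 p hp)
  | some m =>
    symm
    rw [find?_pyRange_some _ ((PySem.Str.len u - 0).toNat) 0 (PySem.Str.len u) m rfl]
    obtain ⟨hsrc, _, hmin⟩ := minfold_some u pvRegionTable none m hA
    rcases hsrc with h1 | ⟨p, hp, hfind, hne⟩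
    · cases h1
    have hm0 : 0 ≤ m := by
      have := PySem.Chars.neg_one_le_find u.toList p.1.toList
      rw [str_find_eq] at hfind
      omega
    have hspec := PySem.Chars.find_spec (s := u.toList) (sub := p.1.toList)
      (by rw [str_find_eq] at hfind; omega)
    rw [str_find_eq] at hfind
    rw [hfind] at hspec
    obtain ⟨hpref, hleast⟩ := hspec
    have hlen : m.toNat < u.toList.length := by
      have h1 := hpref.length_le
      rw [List.length_drop] at h1
      have h2 : 0 < p.1.toList.length := List.length_pos_iff.mpr (tbl_ne_nil p hp)
      omega
    refine ⟨hm0, ?_, ?_, ?_⟩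
    · rw [PySem.Str.len_eq]; omega
    · rw [List.any_eq_true]
      refine ⟨p, hp, ?_⟩
      have : m = ((m.toNat : Nat) : Int) := by omega
      rw [this, matchesAt_iff]
      exact hpref
    · intro j hj1 hj2
      by_contra hcon
      rw [Bool.not_eq_false, List.any_eq_true] at hcon
      obtain ⟨q, hq, hmq⟩ := hcon
      have hj0 : j = ((j.toNat : Nat) : Int) := by omega
      rw [hj0, matchesAt_iff] at hmq
      have hinf : q.1.toList <:+: u.toList :=
        List.infix_iff_prefix_suffix.mpr ⟨_, hmq, List.drop_suffix _ _⟩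
      have hqne : PySem.Str.find u q.1 ≠ -1 := by
        rw [str_find_eq, PySem.Chars.find_ne_neg_one_iff]
        exact hinf
      have hqle : PySem.Str.find u q.1 ≤ j := by
        rw [str_find_eq]
        by_contra hgt
        push_neg at hgt
        have hq0 : 0 ≤ PySem.Chars.find u.toList q.1.toList := by
          rw [PySem.Chars.find_nonneg_iff]; exact hinf
        have hqspec := PySem.Chars.find_spec (s := u.toList) (sub := q.1.toList) hq0
        exact hqspec.2 j.toNat (by omega) hmq
      have := hmin q hq hqne
      omega

-- ---- pvFnd structure ----
theorem fnd_rep (u : String) :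
    pvFnd u = (pvRegionTable.filter (fun p => !(PySem.Str.find u p.1 == -1))).map
      (fun p => (PySem.Str.find u p.1, p.2)) := by
  unfold pvFnd
  have hfun : (fun (acc : List (Int × String)) (p : String × String) =>
      let idx := PySem.Str.find u p.1
      if idx = -1 then acc else acc ++ [(idx, p.2)]) =
      (fun acc p => if (!(PySem.Str.find u p.1 == -1)) = true
        then acc ++ [(PySem.Str.find u p.1, p.2)] else acc) := by
    funext acc p
    by_cases h : PySem.Str.find u p.1 = -1 <;> simp [h]
  rw [hfun, PySem.List.foldl_append_if]
  simp

theorem fnd_mem {u : String} {e : Int × String} :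
    e ∈ pvFnd u ↔ ∃ p ∈ pvRegionTable,
      PySem.Str.find u p.1 ≠ -1 ∧ e = (PySem.Str.find u p.1, p.2) := by
  rw [fnd_rep, List.mem_map]
  constructor
  · rintro ⟨p, hp, he⟩
    rw [List.mem_filter] at hp
    refine ⟨p, hp.1, ?_, he.symm⟩
    have := hp.2
    simpa using this
  · rintro ⟨p, hp, hne, he⟩
    exact ⟨p, List.mem_filter.mpr ⟨hp, by simpa using hne⟩, he.symm⟩

theorem fnd_match {u : String} {e : Int × String} (he : e ∈ pvFnd u) :
    ∃ p ∈ pvRegionTable, p.2 = e.2 ∧ PySem.Str.find u p.1 = e.1 ∧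
      p.1.toList <+: u.toList.drop e.1.toNat := by
  obtain ⟨p, hp, hne, hee⟩ := fnd_mem.mp he
  rw [str_find_eq] at hne
  have h0 : 0 ≤ PySem.Chars.find u.toList p.1.toList := by
    have := PySem.Chars.neg_one_le_find u.toList p.1.toList
    omega
  have hspec := PySem.Chars.find_spec (s := u.toList) (sub := p.1.toList) h0
  refine ⟨p, hp, by rw [hee], by rw [hee, str_find_eq], ?_⟩
  rw [hee]
  simpa [str_find_eq] using hspec.1

theorem fnd_fst_bounds {u : String} {e : Int × String} (he : e ∈ pvFnd u) :
    0 ≤ e.1 ∧ e.1 < (u.toList.length : Int) := by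
  obtain ⟨p, hp, hne, hee⟩ := fnd_mem.mp he
  rw [str_find_eq] at hne
  have h0 : 0 ≤ PySem.Chars.find u.toList p.1.toList := by
    have := PySem.Chars.neg_one_le_find u.toList p.1.toList
    omega
  obtain ⟨q, hq, _, hqfind, hqpref⟩ := fnd_match he
  have h1 := hqpref.length_le
  rw [List.length_drop] at h1
  have h2 : 0 < q.1.toList.length := List.length_pos_iff.mpr (tbl_ne_nil q hq)
  have he0 : 0 ≤ e.1 := by rw [hee]; simpa [str_find_eq] using h0
  constructor
  · exact he0
  · omega

theorem fnd_map_fst_nodup (u : String) : ((pvFnd u).map Prod.fst).Nodup := by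
  rw [fnd_rep, List.map_map]
  apply List.Nodup.map_on
  · intro p hp q hq hfe
    rw [List.mem_filter] at hp hq
    simp only [Function.comp_apply] at hfe
    have hpne : PySem.Str.find u p.1 ≠ -1 := by have := hp.2; simpa using this
    have hqne : PySem.Str.find u q.1 ≠ -1 := by have := hq.2; simpa using this
    rw [str_find_eq] at hpne hqne hfe
    have hp0 : 0 ≤ PySem.Chars.find u.toList p.1.toList := by
      have := PySem.Chars.neg_one_le_find u.toList p.1.toList; omega
    have hq0 : 0 ≤ PySem.Chars.find u.toList q.1.toList := by
      have := PySem.Chars.neg_one_le_find u.toList q.1.toList; omega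
    have hps := (PySem.Chars.find_spec (s := u.toList) (sub := p.1.toList) hp0).1
    have hqs := (PySem.Chars.find_spec (s := u.toList) (sub := q.1.toList) hq0).1
    rw [hfe] at hps
    exact match_unique hp.1 hq.1 hps hqs
  · exact tbl_nodup.filter _

theorem fnd_nodup (u : String) : (pvFnd u).Nodup :=
  List.Nodup.of_map _ (fnd_map_fst_nodup u)

theorem fnd_fst_inj {u : String} {e e' : Int × String}
    (he : e ∈ pvFnd u) (he' : e' ∈ pvFnd u) (h : e.1 = e'.1) : e = e' :=
  List.inj_on_of_nodup_map (fnd_map_fst_nodup u) he he' h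

theorem fnd_map_snd_nodup (u : String) : ((pvFnd u).map Prod.snd).Nodup := by
  rw [fnd_rep, List.map_map]
  have hsub : (pvRegionTable.filter (fun p => !(PySem.Str.find u p.1 == -1))).map
      (Prod.snd ∘ fun p => (PySem.Str.find u p.1, p.2)) =
      (pvRegionTable.filter (fun p => !(PySem.Str.find u p.1 == -1))).map Prod.snd := by
    simp [Function.comp]
  rw [hsub]
  exact tbl_codes_nodup.sublist (List.Sublist.map _ List.filter_sublist)

-- ---- inc / block ----
theorem mem_inc {u : String} {k : Nat} {e : Int × String} :
    e ∈ pvInc u k ↔ e ∈ pvFnd u ∧ e.1 < (k : Int) := by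
  unfold pvInc pvBlock
  rw [List.mem_flatMap]
  constructor
  · rintro ⟨j, hj, he⟩
    rw [List.mem_range] at hj
    rw [List.mem_filter] at he
    have hej : e.1 = (j : Int) := by simpa using he.2
    exact ⟨he.1, by omega⟩
  · rintro ⟨hf, hlt⟩
    have h0 := (fnd_fst_bounds hf).1
    refine ⟨e.1.toNat, ?_, ?_⟩
    · rw [List.mem_range]; omega
    · rw [List.mem_filter]
      exact ⟨hf, by simp; omega⟩

theorem block_subsing {u : String} {j : Nat} :
    ∀ e ∈ pvBlock u j, ∀ e' ∈ pvBlock u j, e = e' := by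
  intro e he e' he'
  unfold pvBlock at he he'
  rw [List.mem_filter] at he he'
  apply fnd_fst_inj he.1 he'.1
  have h1 : e.1 = (j : Int) := by simpa using he.2
  have h2 : e'.1 = (j : Int) := by simpa using he'.2
  rw [h1, h2]

theorem block_eq_of_mem {u : String} {k : Nat} {e : Int × String}
    (he : e ∈ pvBlock u k) : pvBlock u k = [e] := by
  have hnd : (pvBlock u k).Nodup := (fnd_nodup u).filter _
  cases hb : pvBlock u k with
  | nil => rw [hb] at he; cases he
  | cons x l =>
    have hx : x = e := by
      apply block_subsing x (by rw [hb]; exact List.mem_cons_self) e he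
    subst hx
    cases l with
    | nil => rfl
    | cons y l' =>
      exfalso
      have hy : y = x := by
        apply block_subsing y (by rw [hb]; simp) x (by rw [hb]; exact List.mem_cons_self)
      rw [hb] at hnd
      rw [List.nodup_cons] at hnd
      exact hnd.1 (by rw [hy]; exact List.mem_cons_self)

theorem inc_pairwise (u : String) (k : Nat) :
    (pvInc u k).Pairwise (fun a b => a.1 < b.1) := by
  induction k with
  | zero => simp [pvInc]
  | succ k ih =>
    have hsucc : pvInc u (k+1) = pvInc u k ++ pvBlock u k := by
      unfold pvInc
      rw [List.range_succ, List.flatMap_append]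
      simp
    rw [hsucc, List.pairwise_append]
    refine ⟨ih, ?_, ?_⟩
    · cases hb : pvBlock u k with
      | nil => simp
      | cons e l =>
        cases l with
        | nil => simp
        | cons e' l' =>
          exfalso
          have hnd : (pvBlock u k).Nodup := (fnd_nodup u).filter _
          rw [hb, List.nodup_cons] at hnd
          have : e' = e := block_subsing e' (by rw [hb]; simp) e (by rw [hb]; simp)
          exact hnd.1 (by rw [← this]; exact List.mem_cons_self)
    · intro a ha b hb
      have h1 := (mem_inc.mp ha).2
      unfold pvBlock at hb
      rw [List.mem_filter] at hb
      have h2 : b.1 = (k : Int) := by simpa using hb.2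
      omega

theorem inc_perm_fnd (u : String) : (pvInc u u.toList.length).Perm (pvFnd u) := by
  have hincnd : (pvInc u u.toList.length).Nodup := by
    have := inc_pairwise u u.toList.length
    exact List.Pairwise.imp (fun h => by intro he; rw [he] at h; exact lt_irrefl _ h) this
  rw [List.perm_ext_iff_of_nodup hincnd (fnd_nodup u)]
  intro e
  rw [mem_inc]
  constructor
  · exact fun h => h.1
  · exact fun h => ⟨h, (fnd_fst_bounds h).2⟩

theorem sorted_fnd (u : String) :
    PySem.List.sorted (pvFnd u) (fun item => item.1) = pvInc u u.toList.length := by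
  exact PySem.List.sorted_eq_of_perm_of_pairwise_lt _ _ _ (inc_perm_fnd u) (inc_pairwise u _)

-- ---- dedupe fold (A's last loop) ----
theorem dedupe_fold (l : List (Int × String)) (acc : List String)
    (hd : ∀ c ∈ l.map Prod.snd, c ∉ acc) (hn : (l.map Prod.snd).Nodup) :
    l.foldl (fun acc p => if acc.contains p.2 then acc else acc ++ [p.2]) acc =
      acc ++ l.map Prod.snd := by
  induction l generalizing acc with
  | nil => simp
  | cons e l ih =>
    rw [List.foldl_cons]
    have hne : ¬ (acc.contains e.2 = true) := by
      rw [List.contains_iff_mem]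
      exact hd e.2 (by simp)
    rw [if_neg hne]
    rw [List.map_cons] at hn
    rw [List.nodup_cons] at hn
    rw [ih (acc ++ [e.2]) ?_ hn.2]
    · simp
    · intro c hc
      rw [List.mem_append]
      push_neg
      constructor
      · exact hd c (by rw [List.map_cons]; exact List.mem_cons_of_mem _ hc)
      · intro hmem
        rw [List.mem_singleton] at hmem
        exact hn.1 (hmem ▸ hc)

-- ---- B's scan ----
theorem inner_no_add (u : String) (i : Int) (l : List (String × String)) (acc : List String)
    (h : ∀ p ∈ l, pvMatchesAt u i p.1 = false ∨ p.2 ∈ acc) :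
    l.foldl (fun acc2 p =>
        if pvMatchesAt u i p.1 && !acc2.contains p.2 then acc2 ++ [p.2] else acc2) acc = acc := by
  induction l with
  | nil => simp
  | cons p l ih =>
    rw [List.foldl_cons]
    have hstep : (if pvMatchesAt u i p.1 && !acc.contains p.2 then acc ++ [p.2] else acc) = acc := by
      rcases h p List.mem_cons_self with hm | hmem
      · rw [hm]; simp
      · have : acc.contains p.2 = true := List.contains_iff_mem.mpr hmem
        rw [this]; simp
    rw [hstep]
    exact ih (fun q hq => h q (List.mem_cons_of_mem _ hq))

theorem inner_step (u : String) (k : Nat) (acc : List String)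
    (hacc : ∀ c, c ∈ acc ↔ ∃ e ∈ pvFnd u, e.2 = c ∧ e.1 < (k : Int)) :
    pvInner u acc (k : Int) = acc ++ (pvBlock u k).map Prod.snd := by
  unfold pvInner
  by_cases hm : ∃ p ∈ pvRegionTable, p.1.toList <+: u.toList.drop k
  · obtain ⟨p₀, hp₀, hpref⟩ := hm
    have hinf : p₀.1.toList <:+: u.toList :=
      List.infix_iff_prefix_suffix.mpr ⟨_, hpref, List.drop_suffix _ _⟩
    have hne : PySem.Str.find u p₀.1 ≠ -1 := by
      rw [str_find_eq, PySem.Chars.find_ne_neg_one_iff]; exact hinf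
    have h0 : 0 ≤ PySem.Chars.find u.toList p₀.1.toList := by
      rw [PySem.Chars.find_nonneg_iff]; exact hinf
    have hle : PySem.Str.find u p₀.1 ≤ (k : Int) := by
      rw [str_find_eq]
      by_contra hgt
      push_neg at hgt
      exact (PySem.Chars.find_spec (s := u.toList) (sub := p₀.1.toList) h0).2
        k (by omega) hpref
    by_cases hocc : PySem.Str.find u p₀.1 = (k : Int)
    · -- p₀ first occurs exactly here: it gets appended, nothing else does
      have hemem : ((k : Int), p₀.2) ∈ pvFnd u :=
        fnd_mem.mpr ⟨p₀, hp₀, hne, by rw [hocc]⟩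
      have hblock : pvBlock u k = [((k : Int), p₀.2)] :=
        block_eq_of_mem (by unfold pvBlock; rw [List.mem_filter]; exact ⟨hemem, by simp⟩)
      have hnotacc : p₀.2 ∉ acc := by
        intro hmem
        obtain ⟨e, hef, he2, helt⟩ := (hacc p₀.2).mp hmem
        obtain ⟨q, hq, hqe, hee⟩ := fnd_mem.mp hef
        have hq2 : q.2 = p₀.2 := by rw [hee] at he2; exact he2
        have : q = p₀ := code_inj hq hp₀ hq2
        rw [this] at hee
        rw [hee] at helt
        simp only at helt
        omega
      obtain ⟨l₁, l₂, htbl⟩ := List.append_of_mem hp₀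
      have hnd := tbl_nodup
      rw [htbl, List.nodup_append] at hnd
      have hp₀notl₁ : p₀ ∉ l₁ := fun hmem =>
        hnd.2.2 p₀ hmem p₀ List.mem_cons_self rfl
      have honly : ∀ q ∈ pvRegionTable, pvMatchesAt u (k : Int) q.1 = true → q = p₀ := by
        intro q hq hmq
        rw [matchesAt_iff] at hmq
        exact match_unique hq hp₀ hmq hpref
      rw [htbl, List.foldl_append, List.foldl_cons]
      have hl₁ : ∀ p ∈ l₁, pvMatchesAt u (k : Int) p.1 = false ∨ p.2 ∈ acc := by
        intro p hp
        left
        cases hmp : pvMatchesAt u (k : Int) p.1 with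
        | false => rfl
        | true =>
          exfalso
          have : p = p₀ := honly p (by rw [htbl]; exact List.mem_append_left _ hp) hmp
          exact hp₀notl₁ (this ▸ hp)
      rw [inner_no_add u (k : Int) l₁ acc hl₁]
      have hmp₀ : pvMatchesAt u (k : Int) p₀.1 = true := (matchesAt_iff u p₀.1 k).mpr hpref
      have hcont : acc.contains p₀.2 = false := by
        cases hc : acc.contains p₀.2 with
        | false => rfl
        | true => exact absurd (List.contains_iff_mem.mp hc) hnotacc
      rw [hmp₀, hcont]
      simp only [Bool.not_false, Bool.and_true, if_true]
      have hl₂ : ∀ p ∈ l₂, pvMatchesAt u (k : Int) p.1 = false ∨ p.2 ∈ acc ++ [p₀.2] := by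
        intro p hp
        cases hmp : pvMatchesAt u (k : Int) p.1 with
        | false => exact Or.inl rfl
        | true =>
          right
          have : p = p₀ := honly p (by rw [htbl]; exact List.mem_append_right _ (List.mem_cons_of_mem _ hp)) hmp
          rw [this]
          simp
      rw [inner_no_add u (k : Int) l₂ (acc ++ [p₀.2]) hl₂, hblock]
      simp
    · -- p₀ already occurred earlier: everything matching here is already in acc
      have hlt : PySem.Str.find u p₀.1 < (k : Int) := lt_of_le_of_ne hle hocc
      have hp₀acc : p₀.2 ∈ acc := by
        rw [hacc p₀.2]
        exact ⟨(PySem.Str.find u p₀.1, p₀.2), fnd_mem.mpr ⟨p₀, hp₀, hne, rfl⟩, rfl, hlt⟩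
      have hall : ∀ p ∈ pvRegionTable, pvMatchesAt u (k : Int) p.1 = false ∨ p.2 ∈ acc := by
        intro p hp
        cases hmp : pvMatchesAt u (k : Int) p.1 with
        | false => exact Or.inl rfl
        | true =>
          right
          rw [matchesAt_iff] at hmp
          have : p = p₀ := match_unique hp hp₀ hmp hpref
          rw [this]; exact hp₀acc
      rw [inner_no_add u (k : Int) pvRegionTable acc hall]
      have hblock : pvBlock u k = [] := by
        rw [List.eq_nil_iff_forall_not_mem]
        intro e he
        unfold pvBlock at he
        rw [List.mem_filter] at he
        obtain ⟨q, hq, _, hqfind, hqpref⟩ := fnd_match he.1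
        have hek : e.1 = (k : Int) := by simpa using he.2
        rw [hek] at hqpref
        simp only [Int.toNat_natCast] at hqpref
        have : q = p₀ := match_unique hq hp₀ hqpref hpref
        rw [this, hek] at hqfind
        exact hocc hqfind
      rw [hblock]
      simp
  · -- no region name starts at position k at all
    have hall : ∀ p ∈ pvRegionTable, pvMatchesAt u (k : Int) p.1 = false ∨ p.2 ∈ acc := by
      intro p hp
      left
      cases hmp : pvMatchesAt u (k : Int) p.1 with
      | false => rfl
      | true =>
        exfalso
        rw [matchesAt_iff] at hmp
        exact hm ⟨p, hp, hmp⟩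
    rw [inner_no_add u (k : Int) pvRegionTable acc hall]
    have hblock : pvBlock u k = [] := by
      rw [List.eq_nil_iff_forall_not_mem]
      intro e he
      unfold pvBlock at he
      rw [List.mem_filter] at he
      obtain ⟨q, hq, _, _, hqpref⟩ := fnd_match he.1
      have hek : e.1 = (k : Int) := by simpa using he.2
      rw [hek] at hqpref
      simp only [Int.toNat_natCast] at hqpref
      exact hm ⟨q, hq, hqpref⟩
    rw [hblock]
    simp

theorem scan_eq (u : String) (k : Nat) :
    (PySem.List.pyRange 0 (k : Int)).foldl (pvInner u) [] = (pvInc u k).map Prod.snd := by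
  induction k with
  | zero =>
    rw [PySem.List.pyRange_one_eq_nil (by omega)]
    simp [pvInc]
  | succ k ih =>
    have hcast : ((k+1 : Nat) : Int) = (k : Int) + 1 := by push_cast; ring
    rw [hcast, PySem.List.pyRange_one_succ_right (by omega), List.foldl_append]
    rw [ih]
    simp only [List.foldl_cons, List.foldl_nil]
    rw [inner_step u k _ ?_]
    · have hsucc : pvInc u (k+1) = pvInc u k ++ pvBlock u k := by
        unfold pvInc
        rw [List.range_succ, List.flatMap_append]
        simp
      rw [hsucc, List.map_append]
    · intro c
      rw [List.mem_map]
      constructor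
      · rintro ⟨e, he, hec⟩
        exact ⟨e, (mem_inc.mp he).1, hec, (mem_inc.mp he).2⟩
      · rintro ⟨e, he, hec, helt⟩
        exact ⟨e, mem_inc.mpr ⟨he, helt⟩, hec⟩

-- ---- the two code extractions agree ----
theorem extract_eq (t : String) :
    pvExtractRegionCodes t =
      (PySem.List.pyRange 0 (PySem.Str.len (pvNormalize t))).foldl (pvInner (pvNormalize t)) [] := by
  have h1 : pvExtractRegionCodes t =
      (PySem.List.sorted (pvFnd (pvNormalize t)) (fun item => item.1)).foldl
        (fun acc p => if acc.contains p.2 then acc else acc ++ [p.2]) [] := rfl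
  rw [h1, sorted_fnd]
  have hnod : ((pvInc (pvNormalize t) (pvNormalize t).toList.length).map Prod.snd).Nodup := by
    have hperm := inc_perm_fnd (pvNormalize t)
    exact ((hperm.map Prod.snd).nodup_iff).mpr (fnd_map_snd_nodup (pvNormalize t))
  rw [dedupe_fold _ [] (by simp) hnod]
  rw [List.nil_append]
  rw [PySem.Str.len_eq, scan_eq]

-- the bodies of the two ports, past the empty-string test
set_option maxHeartbeats 2000000 in
theorem body_eq (text : String) :
    (match pvRegionTable.foldl (fun acc p =>
        let idx := PySem.Str.find (pvNormalize text) p.1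
        if idx = -1 then acc
        else match acc with
          | none => some idx
          | some f => if idx < f then some idx else some f) none with
      | none => (PySem.Str.strip text, ([] : List String))
      | some i =>
        (PySem.Str.stripChars (PySem.Str.slice text none (some i)) " ,;|-",
         pvExtractRegionCodes (PySem.Str.slice text (some i) none))) =
    (match (PySem.List.pyRange 0 (PySem.Str.len (pvNormalize text))).find?
        (fun i => pvRegionTable.any (fun p => pvMatchesAt (pvNormalize text) i p.1)) with
      | none => (PySem.Str.strip text, ([] : List String))
      | some i =>
        (PySem.Str.stripChars (PySem.Str.slice text none (some i)) " ,;|-",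
         (PySem.List.pyRange 0 (PySem.Str.len (pvNormalize (PySem.Str.slice text (some i) none)))).foldl
           (fun acc j => pvRegionTable.foldl
             (fun acc2 p =>
               if pvMatchesAt (pvNormalize (PySem.Str.slice text (some i) none)) j p.1 && !acc2.contains p.2
               then acc2 ++ [p.2] else acc2) acc) [])) := by
  have hstep : (fun (acc : Option Int) (p : String × String) =>
      let idx := PySem.Str.find (pvNormalize text) p.1
      if idx = -1 then acc
      else match acc with
        | none => some idx
        | some f => if idx < f then some idx else some f) = pvStepA (pvNormalize text) := rfl
  have hinner : ∀ v : String, (fun (acc : List String) (i : Int) =>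
      pvRegionTable.foldl (fun acc2 p =>
        if pvMatchesAt v i p.1 && !acc2.contains p.2 then acc2 ++ [p.2] else acc2) acc) = pvInner v :=
    fun _ => rfl
  rw [hstep]
  simp only [hinner]
  rw [firstidx_eq (pvNormalize text)]
  generalize (PySem.List.pyRange 0 (PySem.Str.len (pvNormalize text))).find?
      (fun i => pvRegionTable.any (fun p => pvMatchesAt (pvNormalize text) i p.1)) = r
  cases r with
  | none => rfl
  | some i =>
    show (PySem.Str.stripChars (PySem.Str.slice text none (some i)) " ,;|-",
          pvExtractRegionCodes (PySem.Str.slice text (some i) none)) =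
         (PySem.Str.stripChars (PySem.Str.slice text none (some i)) " ,;|-",
          (PySem.List.pyRange 0 (PySem.Str.len (pvNormalize (PySem.Str.slice text (some i) none)))).foldl
            (pvInner (pvNormalize (PySem.Str.slice text (some i) none))) [])
    rw [extract_eq (PySem.Str.slice text (some i) none)]

-- ===== VERDICT (by name: the statement is the Claim_ definition above) =====
set_option maxHeartbeats 2000000 in
theorem split_model_and_regions_py_spec : Claim_equal_split_model_and_regions_py := by
  intro text _
  unfold Spec_split_model_and_regions_py
  unfold split_model_and_regions_py split_model_and_regions_py_alt
  by_cases h : text = ""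
  · subst h; rfl
  · rw [if_neg h, if_neg h]
    exact body_eq text
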